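-- pv_equiv track=rewrite | github.com/saiabhiram1928/Presidio_Training | 28-06-2024-Python-Day-2/Q4.py | get_cows_and_bulls
-- ===== SOURCE A (Python) =====
-- def get_cows_and_bulls(secret_word, guessed_word):
--     cows = 0
--     bulls = 0
--     secret_word_counts = {}
--     guessed_word_counts = {}
--
--     for i in range(len(secret_word)):
--         if guessed_word[i] == secret_word[i]:
--             bulls += 1
--         else:
--             secret_word_counts[secret_word[i]] = secret_word_counts.get(secret_word[i], 0) + 1
--             guessed_word_counts[guessed_word[i]] = guessed_word_counts.get(guessed_word[i], 0) + 1
--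
--     for char in guessed_word_counts:
--         if char in secret_word_counts:
--             cows += min(secret_word_counts[char], guessed_word_counts[char])
--
--     return cows, bulls
-- ===== SOURCE B (Python) =====
-- def get_cows_and_bulls(secret_word, guessed_word):
--     n = len(secret_word)
--     bulls = sum(1 if guessed_word[i] == secret_word[i] else 0 for i in range(n))
--     g = guessed_word[:n]
--     total = sum(min(secret_word.count(c), g.count(c)) for c in set(secret_word))
--     return total - bulls, bulls
-- ===== Notes on version B (the rewrite author's own statement) =====
-- stated objective: alternative
-- what changed: B replaces A's two position-by-position dict-building passes over mismatched positions and the dict-key scan by a direct bulls count plus full-string character counts (str.count over set(secret)), using the identity cows = total common count minus bulls.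
import Mathlib
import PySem

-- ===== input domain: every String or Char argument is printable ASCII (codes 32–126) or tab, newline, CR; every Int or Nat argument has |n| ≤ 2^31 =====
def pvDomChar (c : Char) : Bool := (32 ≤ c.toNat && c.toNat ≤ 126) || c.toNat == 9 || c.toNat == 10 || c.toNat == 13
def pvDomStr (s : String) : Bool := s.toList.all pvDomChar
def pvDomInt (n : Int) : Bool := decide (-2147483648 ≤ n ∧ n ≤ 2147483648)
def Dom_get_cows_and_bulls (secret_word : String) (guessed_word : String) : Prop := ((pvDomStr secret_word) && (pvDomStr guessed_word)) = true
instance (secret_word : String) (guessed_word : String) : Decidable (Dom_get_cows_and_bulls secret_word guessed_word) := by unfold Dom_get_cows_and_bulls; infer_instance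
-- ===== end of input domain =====

-- B computes bulls directly and derives cows as (full-count character overlap) − bulls, with no dictionaries; alternative decomposition, not claimed faster.

-- ===== PORT A =====
def get_cows_and_bulls (secret_word : String) (guessed_word : String) : Int × Int :=
  let s := secret_word.toList
  let g := guessed_word.toList
  let st := (PySem.List.pyRange 0 (s.length : Int)).foldl
    (fun (st : Int × PySem.Dict Char Int × PySem.Dict Char Int) i =>
      if PySem.List.pyGetD g i ' ' == PySem.List.pyGetD s i ' ' then
        (st.1 + 1, st.2.1, st.2.2)
      else
        (st.1,
         st.2.1.insert (PySem.List.pyGetD s i ' ') (st.2.1.getD (PySem.List.pyGetD s i ' ') 0 + 1),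
         st.2.2.insert (PySem.List.pyGetD g i ' ') (st.2.2.getD (PySem.List.pyGetD g i ' ') 0 + 1)))
    (0, PySem.Dict.empty, PySem.Dict.empty)
  let cows := st.2.2.keys.foldl
    (fun cows c => if st.2.1.contains c then cows + min (st.2.1.getD c 0) (st.2.2.getD c 0) else cows) 0
  (cows, st.1)

-- ===== PORT B =====
def get_cows_and_bulls_alt (secret_word : String) (guessed_word : String) : Int × Int :=
  let s := secret_word.toList
  let gw := guessed_word.toList
  let n : Int := (s.length : Int)
  let bulls : Int := ((PySem.List.pyRange 0 n).map
    (fun i => if PySem.List.pyGetD gw i ' ' == PySem.List.pyGetD s i ' ' then (1 : Int) else 0)).sum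
  let g := PySem.List.slice gw none (some n)
  let total : Int := ((PySem.Set.ofList s).map
    (fun c => min ((s.count c : Int)) ((g.count c : Int)))).sum
  (total - bulls, bulls)

-- ===== PRECONDITION & SPEC =====
-- Pre_ excludes exactly the inputs where the guess is shorter than the secret: there Python A raises IndexError (and so does B).
def Pre_get_cows_and_bulls (secret_word : String) (guessed_word : String) : Prop :=
  secret_word.toList.length ≤ guessed_word.toList.length
instance (secret_word : String) (guessed_word : String) : Decidable (Pre_get_cows_and_bulls secret_word guessed_word) := by unfold Pre_get_cows_and_bulls; infer_instance
def pvWitness_get_cows_and_bulls : String × String := ("abcd", "adbc")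

def Spec_get_cows_and_bulls (secret_word : String) (guessed_word : String) (out : Int × Int) : Prop := out = get_cows_and_bulls_alt secret_word guessed_word
instance (secret_word : String) (guessed_word : String) (out : Int × Int) : Decidable (Spec_get_cows_and_bulls secret_word guessed_word out) := by unfold Spec_get_cows_and_bulls; infer_instance

-- ===== CLAIM (what is proved, stated in full; the proofs are below) =====
def Claim_equal_get_cows_and_bulls : Prop := ∀ (secret_word : String) (guessed_word : String), Dom_get_cows_and_bulls secret_word guessed_word → Pre_get_cows_and_bulls secret_word guessed_word → Spec_get_cows_and_bulls secret_word guessed_word (get_cows_and_bulls secret_word guessed_word)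

-- ===== LEMMAS AND PROOFS =====

/-- The list of (secret, guess) character pairs read off by index over `range (len secret)`. -/
theorem pv_map_range_zip (s g : List Char) (h : s.length ≤ g.length) :
    (List.range s.length).map (fun i => (s.getD i ' ', g.getD i ' '))
      = s.zip (List.take s.length g) := by
  apply List.ext_getElem
  · simp [List.length_zip]; omega
  · intro i h1 h2
    simp [List.getElem_zip, List.getD_eq_getElem?_getD]
    constructor
    · rw [List.getElem?_eq_getElem (by simpa using h1)]; rfl
    · rw [List.getElem?_eq_getElem (by simp at h1 ⊢; omega)]
      simp

/-- A's indexed loop is a fold over the zipped character pairs. -/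
theorem pv_fold_zip {β : Type} (s g : List Char) (h : s.length ≤ g.length)
    (f : β → Char × Char → β) (init : β) :
    (PySem.List.pyRange 0 (s.length : Int)).foldl
      (fun st i => f st (PySem.List.pyGetD s i ' ', PySem.List.pyGetD g i ' ')) init
    = (s.zip (List.take s.length g)).foldl f init := by
  rw [PySem.List.pyRange_zero_natCast, List.foldl_map, ← pv_map_range_zip s g h, List.foldl_map]
  simp [PySem.List.pyGetD_natCast]

/-- Counting indices with a property of the indexed pair = counting zipped pairs. -/
theorem pv_countP_range (s g : List Char) (h : s.length ≤ g.length) (p : Char × Char → Bool) :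
    List.countP (fun k => p (s.getD k ' ', g.getD k ' ')) (List.range s.length)
      = List.countP p (s.zip (List.take s.length g)) := by
  rw [← pv_map_range_zip s g h, List.countP_map]
  rfl

/-- A's single loop splits into: bulls count, and the two per-character counters of the mismatched positions. -/
theorem pv_fold3 (ps : List (Char × Char)) (b : Int) (d1 d2 : PySem.Dict Char Int) :
    ps.foldl (fun (st : Int × PySem.Dict Char Int × PySem.Dict Char Int) p =>
      if p.2 == p.1 then (st.1 + 1, st.2.1, st.2.2)
      else (st.1, st.2.1.insert p.1 (st.2.1.getD p.1 0 + 1), st.2.2.insert p.2 (st.2.2.getD p.2 0 + 1)))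
      (b, d1, d2)
    = (b + (ps.countP (fun p => p.2 == p.1) : Int),
       ((ps.filter (fun p => !(p.2 == p.1))).map Prod.fst).foldl (fun d c => d.insert c (d.getD c 0 + 1)) d1,
       ((ps.filter (fun p => !(p.2 == p.1))).map Prod.snd).foldl (fun d c => d.insert c (d.getD c 0 + 1)) d2) := by
  induction ps generalizing b d1 d2 with
  | nil => simp
  | cons p t ih =>
    rw [List.foldl_cons]
    by_cases hb : (p.2 == p.1) = true
    · rw [if_pos hb, ih, List.countP_cons, List.filter_cons]
      rw [if_pos hb]
      simp [hb]
      ring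
    · rw [if_neg hb, ih, List.countP_cons, List.filter_cons]
      simp [hb]

/-- Full secret-side count = bulls with that character + mismatched-side count. -/
theorem pv_count_fst (ps : List (Char × Char)) (c : Char) :
    (ps.map Prod.fst).count c
      = ps.countP (fun p => p.2 == p.1 && p.1 == c)
        + ((ps.filter (fun p => !(p.2 == p.1))).map Prod.fst).count c := by
  induction ps with
  | nil => simp
  | cons p t ih =>
    by_cases hb : (p.2 == p.1) = true <;> by_cases hc : (p.1 == c) = true <;>
      simp [List.count_cons, List.countP_cons, List.filter_cons, hb, hc, ih] <;> omega

/-- Full guess-side count = bulls with that character + mismatched-side count. -/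
theorem pv_count_snd (ps : List (Char × Char)) (c : Char) :
    (ps.map Prod.snd).count c
      = ps.countP (fun p => p.2 == p.1 && p.1 == c)
        + ((ps.filter (fun p => !(p.2 == p.1))).map Prod.snd).count c := by
  induction ps with
  | nil => simp
  | cons p t ih =>
    by_cases hb : (p.2 == p.1) = true
    · have heq : p.2 = p.1 := by simpa using hb
      by_cases hc : (p.1 == c) = true <;>
        simp [List.count_cons, List.countP_cons, List.filter_cons, hb, hc, heq, ih] <;> omega
    · by_cases hc : (p.2 == c) = true <;>
        simp [List.count_cons, List.countP_cons, List.filter_cons, hb, hc, ih] <;> omega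

/-- A guarded accumulate-loop is a sum. -/
theorem pv_foldl_ifadd {α : Type} (l : List α) (p : α → Bool) (f : α → Int) (a : Int) :
    l.foldl (fun acc x => if p x then acc + f x else acc) a
      = a + (l.map (fun x => if p x then f x else 0)).sum := by
  have hfe : (fun (acc : Int) x => if p x then acc + f x else acc)
      = fun (acc : Int) x => acc + (if p x then f x else 0) := by
    funext acc x; split <;> simp
  rw [hfe, PySem.List.foldl_add]

/-- A sum over the distinct elements of a list is a Finset sum. -/
theorem pv_sum_ofList {α : Type} [BEq α] [LawfulBEq α] [DecidableEq α] (X : List α) (f : α → Int) :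
    ((PySem.Set.ofList X).map f).sum = ∑ c ∈ X.toFinset, f c := by
  rw [← List.sum_toFinset f (PySem.Set.nodup_ofList X)]
  congr 1
  ext c
  simp [PySem.Set.mem_ofList]

/-- Core identity: cows over mismatched positions + bulls = full-count character overlap. -/
theorem pv_core (s gt : List Char) (hl : gt.length = s.length) :
    ((PySem.Set.ofList ((((s.zip gt).filter (fun p => !(p.2 == p.1)))).map Prod.snd)).map
        (fun c => min (((((s.zip gt).filter (fun p => !(p.2 == p.1))).map Prod.fst).count c : Int))
                      (((((s.zip gt).filter (fun p => !(p.2 == p.1))).map Prod.snd).count c : Int)))).sum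
      + ((s.zip gt).countP (fun p => p.2 == p.1) : Int)
    = ((PySem.Set.ofList s).map (fun c => min ((s.count c : Int)) ((gt.count c : Int)))).sum := by
  set ps := s.zip gt with hps
  set mm := ps.filter (fun p => !(p.2 == p.1)) with hmm
  have hs : ps.map Prod.fst = s := List.map_fst_zip (by omega)
  have hg : ps.map Prod.snd = gt := List.map_snd_zip (by omega)
  rw [pv_sum_ofList, pv_sum_ofList]
  have hsub1 : (mm.map Prod.snd).toFinset ⊆ (s ++ gt).toFinset := by
    intro c hc
    rw [List.mem_toFinset, List.mem_map] at hc
    obtain ⟨p, hp, rfl⟩ := hc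
    simp only [List.mem_toFinset, List.mem_append]
    exact Or.inr (List.of_mem_zip (List.mem_of_mem_filter hp)).2
  have hsub2 : s.toFinset ⊆ (s ++ gt).toFinset := by
    intro c hc; simp at hc ⊢; exact Or.inl hc
  rw [Finset.sum_subset hsub1 ?z1, Finset.sum_subset hsub2 ?z2]
  case z1 =>
    intro c _ hc
    have : (mm.map Prod.snd).count c = 0 := by
      simpa [List.count_eq_zero] using (by simpa using hc : c ∉ mm.map Prod.snd)
    rw [this]
    simp only [Nat.cast_zero]
    omega
  case z2 =>
    intro c _ hc
    have : s.count c = 0 := by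
      simpa [List.count_eq_zero] using (by simpa using hc : c ∉ s)
    rw [this]
    simp only [Nat.cast_zero]
    omega
  have hbc : ∀ c : Char, min ((s.count c : Int)) ((gt.count c : Int))
      = min (((mm.map Prod.fst).count c : Int)) (((mm.map Prod.snd).count c : Int))
        + (ps.countP (fun p => p.2 == p.1 && p.1 == c) : Int) := by
    intro c
    have h1 := pv_count_fst ps c
    have h2 := pv_count_snd ps c
    rw [hs] at h1; rw [hg] at h2
    rw [← hmm] at h1 h2
    omega
  rw [Finset.sum_congr rfl (fun c _ => hbc c), Finset.sum_add_distrib]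
  have hbull : ∑ c ∈ (s ++ gt).toFinset, (ps.countP (fun p => p.2 == p.1 && p.1 == c) : Int)
      = (ps.countP (fun p => p.2 == p.1) : Int) := by
    set B := (ps.filter (fun p => p.2 == p.1)).map Prod.fst with hB
    have hcnt : ∀ c : Char, ps.countP (fun p => p.2 == p.1 && p.1 == c) = B.count c := by
      intro c
      rw [hB, List.count_eq_countP, List.countP_map, List.countP_filter]
      apply List.countP_congr
      intro p _
      simp [Function.comp, Bool.and_comm]
    have hBsub : B.toFinset ⊆ (s ++ gt).toFinset := by
      intro c hc
      rw [List.mem_toFinset, List.mem_map] at hc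
      obtain ⟨p, hp, rfl⟩ := hc
      simp only [List.mem_toFinset, List.mem_append]
      exact Or.inl (List.of_mem_zip (List.mem_of_mem_filter hp)).1
    have hlen : B.length = ps.countP (fun p => p.2 == p.1) := by
      rw [hB, List.length_map, ← List.countP_eq_length_filter]
    calc ∑ c ∈ (s ++ gt).toFinset, (ps.countP (fun p => p.2 == p.1 && p.1 == c) : Int)
        = ∑ c ∈ (s ++ gt).toFinset, (B.count c : Int) := by
          exact Finset.sum_congr rfl (fun c _ => by rw [hcnt c])
      _ = ∑ c ∈ B.toFinset, (B.count c : Int) := by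
          symm
          apply Finset.sum_subset hBsub
          intro c _ hc
          simp [List.count_eq_zero.mpr (by simpa using hc)]
      _ = (B.length : Int) := by
          rw [← Nat.cast_sum, List.sum_toFinset_count_eq_length]
      _ = (ps.countP (fun p => p.2 == p.1) : Int) := by rw [hlen]
  rw [hbull]

-- ===== VERDICT (by name: the statement is the Claim_ definition above) =====
theorem get_cows_and_bulls_spec : Claim_equal_get_cows_and_bulls := by
  intro sw gw _ h
  unfold Spec_get_cows_and_bulls
  have h' : sw.toList.length ≤ gw.toList.length := h
  -- nice names (proof-local)
  -- ps : the zipped pairs; mm : the mismatched pairs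
  -- A's loop, in zipped form, evaluates to (bulls, counter of mismatched secret chars, counter of mismatched guess chars)
  have hst : (sw.toList.zip (List.take sw.toList.length gw.toList)).foldl
      (fun (st : Int × PySem.Dict Char Int × PySem.Dict Char Int) p =>
        if p.2 == p.1 then (st.1 + 1, st.2.1, st.2.2)
        else (st.1, st.2.1.insert p.1 (st.2.1.getD p.1 0 + 1), st.2.2.insert p.2 (st.2.2.getD p.2 0 + 1)))
      (0, PySem.Dict.empty, PySem.Dict.empty)
      = (((sw.toList.zip (List.take sw.toList.length gw.toList)).countP (fun p => p.2 == p.1) : Int),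
         PySem.Dict.counter (((sw.toList.zip (List.take sw.toList.length gw.toList)).filter (fun p => !(p.2 == p.1))).map Prod.fst),
         PySem.Dict.counter (((sw.toList.zip (List.take sw.toList.length gw.toList)).filter (fun p => !(p.2 == p.1))).map Prod.snd)) := by
    rw [pv_fold3, PySem.Dict.foldl_insert_getD_add_one_eq_counter,
        PySem.Dict.foldl_insert_getD_add_one_eq_counter, zero_add]
  have hstA := (pv_fold_zip sw.toList gw.toList h'
      (fun (st : Int × PySem.Dict Char Int × PySem.Dict Char Int) p =>
        if p.2 == p.1 then (st.1 + 1, st.2.1, st.2.2)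
        else (st.1, st.2.1.insert p.1 (st.2.1.getD p.1 0 + 1), st.2.2.insert p.2 (st.2.2.getD p.2 0 + 1)))
      (0, PySem.Dict.empty, PySem.Dict.empty)).trans hst
  -- A's value, by congruence through the cows loop
  have hAval : get_cows_and_bulls sw gw
      = ((PySem.Dict.counter (((sw.toList.zip (List.take sw.toList.length gw.toList)).filter (fun p => !(p.2 == p.1))).map Prod.snd)).keys.foldl
          (fun cows c =>
            if (PySem.Dict.counter (((sw.toList.zip (List.take sw.toList.length gw.toList)).filter (fun p => !(p.2 == p.1))).map Prod.fst)).contains c then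
              cows + min ((PySem.Dict.counter (((sw.toList.zip (List.take sw.toList.length gw.toList)).filter (fun p => !(p.2 == p.1))).map Prod.fst)).getD c 0)
                        ((PySem.Dict.counter (((sw.toList.zip (List.take sw.toList.length gw.toList)).filter (fun p => !(p.2 == p.1))).map Prod.snd)).getD c 0)
            else cows) 0,
         ((sw.toList.zip (List.take sw.toList.length gw.toList)).countP (fun p => p.2 == p.1) : Int)) :=
    congrArg (fun st : Int × PySem.Dict Char Int × PySem.Dict Char Int =>
      ((st.2.2.keys.foldl (fun cows c => if st.2.1.contains c then cows + min (st.2.1.getD c 0) (st.2.2.getD c 0) else cows) 0 : Int), st.1)) hstA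
  -- B's bulls term, in zipped form
  have hBbulls : ((PySem.List.pyRange 0 (sw.toList.length : Int)).map
      (fun i => if PySem.List.pyGetD gw.toList i ' ' == PySem.List.pyGetD sw.toList i ' ' then (1 : Int) else 0)).sum
      = (((sw.toList.zip (List.take sw.toList.length gw.toList)).countP (fun p => p.2 == p.1) : Int)) := by
    rw [PySem.List.pyRange_zero_natCast, List.map_map]
    have hcomp : ((fun i => if PySem.List.pyGetD gw.toList i ' ' == PySem.List.pyGetD sw.toList i ' ' then (1 : Int) else 0)
        ∘ (fun k : Nat => (k : Int)))
        = fun k : Nat => if (fun p : Char × Char => p.2 == p.1) (sw.toList.getD k ' ', gw.toList.getD k ' ') then (1 : Int) else 0 := by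
      funext k
      simp [Function.comp, PySem.List.pyGetD_natCast]
    rw [hcomp, PySem.List.sum_map_ite_one_zero, pv_countP_range sw.toList gw.toList h' (fun p => p.2 == p.1)]
  -- B's total term, with the slice evaluated
  have hBtotal : ((PySem.Set.ofList sw.toList).map
      (fun c => min ((sw.toList.count c : Int)) (((PySem.List.slice gw.toList none (some (sw.toList.length : Int))).count c : Int)))).sum
      = ((PySem.Set.ofList sw.toList).map
      (fun c => min ((sw.toList.count c : Int)) (((List.take sw.toList.length gw.toList).count c : Int)))).sum := by
    rw [PySem.List.slice_to_natCast]
  have hBval : get_cows_and_bulls_alt sw gw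
      = (((PySem.Set.ofList sw.toList).map
            (fun c => min ((sw.toList.count c : Int)) (((List.take sw.toList.length gw.toList).count c : Int)))).sum
          - (((sw.toList.zip (List.take sw.toList.length gw.toList)).countP (fun p => p.2 == p.1) : Int)),
         (((sw.toList.zip (List.take sw.toList.length gw.toList)).countP (fun p => p.2 == p.1) : Int))) :=
    congrArg₂ (fun (t b : Int) => (t - b, b)) hBtotal hBbulls
  rw [hAval, hBval]
  -- it remains to relate the two first components
  have hl : (List.take sw.toList.length gw.toList).length = sw.toList.length := by
    rw [List.length_take]; omega
  have hcore := pv_core sw.toList (List.take sw.toList.length gw.toList) hl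
  -- rewrite A's cows loop as the sum over the mismatched-guess character set
  rw [PySem.Dict.keys_counter, pv_foldl_ifadd, zero_add]
  have hterm : ∀ c : Char,
      (if (PySem.Dict.counter (((sw.toList.zip (List.take sw.toList.length gw.toList)).filter (fun p => !(p.2 == p.1))).map Prod.fst)).contains c then
          min ((PySem.Dict.counter (((sw.toList.zip (List.take sw.toList.length gw.toList)).filter (fun p => !(p.2 == p.1))).map Prod.fst)).getD c 0)
              ((PySem.Dict.counter (((sw.toList.zip (List.take sw.toList.length gw.toList)).filter (fun p => !(p.2 == p.1))).map Prod.snd)).getD c 0)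
        else 0)
      = min (((((sw.toList.zip (List.take sw.toList.length gw.toList)).filter (fun p => !(p.2 == p.1))).map Prod.fst).count c : Int))
            (((((sw.toList.zip (List.take sw.toList.length gw.toList)).filter (fun p => !(p.2 == p.1))).map Prod.snd).count c : Int)) := by
    intro c
    rw [PySem.Dict.contains_counter, PySem.Dict.getD_counter, PySem.Dict.getD_counter]
    by_cases hc : (((sw.toList.zip (List.take sw.toList.length gw.toList)).filter (fun p => !(p.2 == p.1))).map Prod.fst).contains c = true
    · rw [if_pos hc]
    · rw [if_neg hc]
      have h0 : (((sw.toList.zip (List.take sw.toList.length gw.toList)).filter (fun p => !(p.2 == p.1))).map Prod.fst).count c = 0 := by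
        rw [List.count_eq_zero]
        simpa using hc
      rw [h0]
      simp only [Nat.cast_zero]
      omega
  rw [List.map_congr_left (fun c _ => hterm c)]
  have : (((PySem.Set.ofList (((sw.toList.zip (List.take sw.toList.length gw.toList)).filter (fun p => !(p.2 == p.1))).map Prod.snd)).map
      (fun c => min (((((sw.toList.zip (List.take sw.toList.length gw.toList)).filter (fun p => !(p.2 == p.1))).map Prod.fst).count c : Int))
                    (((((sw.toList.zip (List.take sw.toList.length gw.toList)).filter (fun p => !(p.2 == p.1))).map Prod.snd).count c : Int)))).sum)
      = ((PySem.Set.ofList sw.toList).map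
          (fun c => min ((sw.toList.count c : Int)) (((List.take sw.toList.length gw.toList).count c : Int)))).sum
        - (((sw.toList.zip (List.take sw.toList.length gw.toList)).countP (fun p => p.2 == p.1) : Int)) := by
    omega
  rw [this]
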